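-- pv_equiv track=rewrite | github.com/Sameer-4359/Intelliword | wordSearch.py | directional_dfs_ai
-- ===== SOURCE A (Python) =====
-- def directional_dfs_ai(grid, word):
--     directions = [(0, 1), (1, 0), (1, 1)]  # Right, Down, Diagonal
--     size = len(grid)
--     word_len = len(word)
--
--     def dfs(r, c, index, dr=None, dc=None, path=[]):
--         if index == len(word):
--             return path
--
--         if not (0 <= r < size and 0 <= c < size):
--             return None
--
--         if grid[r][c] != word[index]:
--             return None
--
--         path.append((r, c))
--
--         if dr is not None and dc is not None:
--             # Continue in the given direction
--             return dfs(r + dr, c + dc, index + 1, dr, dc, path)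
--         else:
--             # Try all 3 directions from the first letter
--             for new_dr, new_dc in directions:
--                 result = dfs(r + new_dr, c + new_dc, index + 1, new_dr, new_dc, path.copy())
--                 if result:
--                     return result
--
--         return None
--
--     for row in range(size):
--         for col in range(size):
--             if grid[row][col] == word[0]:
--                 found_path = dfs(row, col, 0, None, None, [])
--                 if found_path:
--                     return found_path
--
--     return None
-- ===== SOURCE B (Python) =====
-- def directional_dfs_ai(grid, word):
--     size = len(grid)
--     for row in range(size):
--         for col in range(size):
--             if grid[row][col] == word[0]:
--                 for dr, dc in ((0, 1), (1, 0), (1, 1)):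
--                     path = []
--                     ok = True
--                     for k in range(len(word)):
--                         r, c = row + k * dr, col + k * dc
--                         if not (r < size and c < size) or grid[r][c] != word[k]:
--                             ok = False
--                             break
--                         path.append((r, c))
--                     if ok:
--                         return path
--     return None
-- ===== Notes on version B (the rewrite author's own statement) =====
-- stated objective: idiomatic
-- what changed: Replaces A's recursive dfs with optional-direction dispatch, mutable default argument and per-direction path copies by three flat loops: each direction is walked iteratively with an index k and a break/ok flag, appending to one path list.
-- outside the precondition, e.g. on directional_dfs_ai([['a', 'b'], ['a']], 'aa'): A returns [(0, 0), (1, 0)], B returns [(0, 0), (1, 0)]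
import Mathlib
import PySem

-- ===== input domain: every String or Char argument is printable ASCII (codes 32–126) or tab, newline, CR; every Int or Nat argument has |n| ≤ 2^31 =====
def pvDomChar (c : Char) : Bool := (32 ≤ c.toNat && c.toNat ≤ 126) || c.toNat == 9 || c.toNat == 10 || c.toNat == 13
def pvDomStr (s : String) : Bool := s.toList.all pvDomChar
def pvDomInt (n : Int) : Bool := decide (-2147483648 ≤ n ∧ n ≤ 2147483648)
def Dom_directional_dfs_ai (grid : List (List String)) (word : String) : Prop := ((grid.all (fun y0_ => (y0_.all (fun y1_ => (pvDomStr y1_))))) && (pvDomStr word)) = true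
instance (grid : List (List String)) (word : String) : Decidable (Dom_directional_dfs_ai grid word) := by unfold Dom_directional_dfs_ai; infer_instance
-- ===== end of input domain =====

-- B replaces A's recursive dfs (optional direction, path copies) by flat iterative
-- per-direction walks with a break flag; same return value, no speed claim.

-- ===== PORT A =====

-- grid[r][c]; exact when 0 ≤ r < len(grid) and 0 ≤ c < len(row) (Python raises
-- outside that; such accesses are excluded by Pre_).
def pvCellA (grid : List (List String)) (r c : Int) : String :=
  (grid.getD r.toNat []).getD c.toNat ""

-- Python truthiness of an Optional[list]: non-None and non-empty.
def pvTruthyA (o : Option (List (Int × Int))) : Bool :=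
  match o with
  | some p => !p.isEmpty
  | none => false

-- dfs(r, c, index, dr, dc, path): `index` becomes the remaining suffix of word;
-- the for-loop over the literal 3-element `directions` is unrolled.
def pvDfsA (grid : List (List String)) (size : Int) :
    List Char → Int → Int → Option (Int × Int) → List (Int × Int) → Option (List (Int × Int))
  | [], _, _, _, path => some path
  | ch :: rest, r, c, dir, path =>
    if ¬(0 ≤ r ∧ r < size ∧ 0 ≤ c ∧ c < size) then none
    else if pvCellA grid r c ≠ String.ofList [ch] then none
    else
      let path := path ++ [(r, c)]
      match dir with
      | some (dr, dc) => pvDfsA grid size rest (r + dr) (c + dc) (some (dr, dc)) path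
      | none =>
        let res1 := pvDfsA grid size rest (r + 0) (c + 1) (some (0, 1)) path
        if pvTruthyA res1 then res1
        else
          let res2 := pvDfsA grid size rest (r + 1) (c + 0) (some (1, 0)) path
          if pvTruthyA res2 then res2
          else
            let res3 := pvDfsA grid size rest (r + 1) (c + 1) (some (1, 1)) path
            if pvTruthyA res3 then res3 else none

-- inner `for col in range(size)` with early return on a truthy found_path
def pvScanColsA (grid : List (List String)) (size : Int) (wlist : List Char)
    (first : String) (row : Int) : List Int → Option (List (Int × Int))
  | [] => none
  | col :: cols =>
    if pvCellA grid row col == first then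
      let fp := pvDfsA grid size wlist row col none []
      if pvTruthyA fp then fp else pvScanColsA grid size wlist first row cols
    else pvScanColsA grid size wlist first row cols

-- outer `for row in range(size)`
def pvScanRowsA (grid : List (List String)) (size : Int) (wlist : List Char)
    (first : String) : List Int → Option (List (Int × Int))
  | [] => none
  | row :: rows =>
    match pvScanColsA grid size wlist first row (PySem.List.pyRange 0 size 1) with
    | some p => some p
    | none => pvScanRowsA grid size wlist first rows

def directional_dfs_ai (grid : List (List String)) (word : String) : Option (List (Int × Int)) :=
  let size : Int := grid.length
  let wlist := word.toList
  -- word[0]; Python raises IndexError on the empty word once a cell is scanned (excluded by Pre_)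
  let first := String.ofList [wlist.getD 0 ' ']
  pvScanRowsA grid size wlist first (PySem.List.pyRange 0 size 1)

-- ===== PORT B =====

-- the `for k in range(len(word))` walk with break/ok flag: recursion over the
-- remaining letters, stepping (r, c) by (dr, dc); `none` = the loop broke.
def pvWalkB (grid : List (List String)) (size dr dc : Int) :
    List Char → Int → Int → List (Int × Int) → Option (List (Int × Int))
  | [], _, _, path => some path
  | ch :: rest, r, c, path =>
    if ¬(r < size ∧ c < size) then none
    else if pvCellA grid r c ≠ String.ofList [ch] then none
    else pvWalkB grid size dr dc rest (r + dr) (c + dc) (path ++ [(r, c)])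

-- `for dr, dc in ((0,1),(1,0),(1,1))` with `if ok: return path`
def pvTryDirsB (grid : List (List String)) (size : Int) (wlist : List Char)
    (row col : Int) : List (Int × Int) → Option (List (Int × Int))
  | [] => none
  | (dr, dc) :: ds =>
    match pvWalkB grid size dr dc wlist row col [] with
    | some p => some p
    | none => pvTryDirsB grid size wlist row col ds

def pvScanColsB (grid : List (List String)) (size : Int) (wlist : List Char)
    (row : Int) : List Int → Option (List (Int × Int))
  | [] => none
  | col :: cols =>
    if pvCellA grid row col == String.ofList [wlist.getD 0 ' '] then
      match pvTryDirsB grid size wlist row col [(0, 1), (1, 0), (1, 1)] with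
      | some p => some p
      | none => pvScanColsB grid size wlist row cols
    else pvScanColsB grid size wlist row cols

def pvScanRowsB (grid : List (List String)) (size : Int) (wlist : List Char) :
    List Int → Option (List (Int × Int))
  | [] => none
  | row :: rows =>
    match pvScanColsB grid size wlist row (PySem.List.pyRange 0 size 1) with
    | some p => some p
    | none => pvScanRowsB grid size wlist rows

def directional_dfs_ai_alt (grid : List (List String)) (word : String) : Option (List (Int × Int)) :=
  let size : Int := grid.length
  pvScanRowsB grid size word.toList (PySem.List.pyRange 0 size 1)

-- ===== PRECONDITION & SPEC =====
-- Pre_ excludes (a) a nonempty grid with the empty word, where word[0] raises IndexError,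
-- and (b) grids with a row shorter than len(grid), where the row-major scan can raise
-- IndexError (on such grids A returns None or a path only when it never reaches a missing cell,
-- and B agrees there as well).
def Pre_directional_dfs_ai (grid : List (List String)) (word : String) : Prop :=
  (grid = [] ∨ word ≠ "") ∧ ∀ row ∈ grid, grid.length ≤ row.length
instance (grid : List (List String)) (word : String) : Decidable (Pre_directional_dfs_ai grid word) := by unfold Pre_directional_dfs_ai; infer_instance

def pvWitness_directional_dfs_ai : List (List String) × String :=
  ([["a", "b"], ["c", "a"]], "ab")

def Spec_directional_dfs_ai (grid : List (List String)) (word : String) (out : Option (List (Int × Int))) : Prop := out = directional_dfs_ai_alt grid word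
instance (grid : List (List String)) (word : String) (out : Option (List (Int × Int))) : Decidable (Spec_directional_dfs_ai grid word out) := by unfold Spec_directional_dfs_ai; infer_instance

-- ===== CLAIM (what is proved, stated in full; the proofs are below) =====
def Claim_equal_directional_dfs_ai : Prop := ∀ (grid : List (List String)) (word : String), Dom_directional_dfs_ai grid word → Pre_directional_dfs_ai grid word → Spec_directional_dfs_ai grid word (directional_dfs_ai grid word)

-- ===== LEMMAS AND PROOFS =====

-- a directed dfs of A equals B's walk once the coordinates are nonnegative
lemma pvDfs_eq_walk (grid : List (List String)) (size dr dc : Int)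
    (hdr : 0 ≤ dr) (hdc : 0 ≤ dc) :
    ∀ (rest : List Char) (r c : Int), 0 ≤ r → 0 ≤ c → ∀ (path : List (Int × Int)),
      pvDfsA grid size rest r c (some (dr, dc)) path = pvWalkB grid size dr dc rest r c path := by
  intro rest
  induction rest with
  | nil => intro r c _ _ path; rfl
  | cons ch rest ih =>
    intro r c hr hc path
    simp only [pvDfsA, pvWalkB]
    by_cases hb : r < size ∧ c < size
    · have : ¬¬(0 ≤ r ∧ r < size ∧ 0 ≤ c ∧ c < size) := by omega
      rw [if_neg this, if_neg (by omega : ¬¬(r < size ∧ c < size))]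
      by_cases hcell : pvCellA grid r c ≠ String.ofList [ch]
      · rw [if_pos hcell, if_pos hcell]
      · rw [if_neg hcell, if_neg hcell]
        exact ih (r + dr) (c + dc) (by omega) (by omega) (path ++ [(r, c)])
    · rw [if_pos (by omega), if_pos (by omega)]

-- a directed dfs that succeeds returns an extension of its accumulated path
lemma pvDfs_some_prefix (grid : List (List String)) (size : Int) :
    ∀ (rest : List Char) (r c dr dc : Int) (path p : List (Int × Int)),
      pvDfsA grid size rest r c (some (dr, dc)) path = some p → ∃ t, p = path ++ t := by
  intro rest
  induction rest with
  | nil =>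
    intro r c dr dc path p h
    simp only [pvDfsA, Option.some.injEq] at h
    exact ⟨[], by simp [h.symm]⟩
  | cons ch rest ih =>
    intro r c dr dc path p h
    simp only [pvDfsA] at h
    split at h
    · exact absurd h (by simp)
    · split at h
      · exact absurd h (by simp)
      · obtain ⟨t, ht⟩ := ih (r + dr) (c + dc) dr dc (path ++ [(r, c)]) p h
        exact ⟨(r, c) :: t, by simp [ht]⟩

-- at a matching start cell inside bounds, A's undirected dfs equals B's direction loop
lemma pvDfs_none_eq_tryDirs (grid : List (List String)) (size : Int)
    (w0 : Char) (rest : List Char) (row col : Int)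
    (hr : 0 ≤ row ∧ row < size) (hc : 0 ≤ col ∧ col < size)
    (hcell : pvCellA grid row col = String.ofList [w0]) :
    pvDfsA grid size (w0 :: rest) row col none [] =
      pvTryDirsB grid size (w0 :: rest) row col [(0, 1), (1, 0), (1, 1)] := by
  have hbound : ¬¬(0 ≤ row ∧ row < size ∧ 0 ≤ col ∧ col < size) := by omega
  have hb' : ¬¬(row < size ∧ col < size) := by omega
  have hcell' : ¬(pvCellA grid row col ≠ String.ofList [w0]) := by simpa using hcell
  have walkStep : ∀ dr dc : Int,
      pvWalkB grid size dr dc (w0 :: rest) row col [] =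
        pvWalkB grid size dr dc rest (row + dr) (col + dc) [(row, col)] := by
    intro dr dc
    simp only [pvWalkB]
    rw [if_neg hb', if_neg (by exact hcell')]
    simp
  have dirEq : ∀ dr dc : Int, 0 ≤ dr → 0 ≤ dc →
      pvDfsA grid size rest (row + dr) (col + dc) (some (dr, dc)) [(row, col)] =
        pvWalkB grid size dr dc (w0 :: rest) row col [] := by
    intro dr dc hdr hdc
    rw [walkStep]
    exact pvDfs_eq_walk grid size dr dc hdr hdc rest (row + dr) (col + dc)
      (by omega) (by omega) [(row, col)]
  have truthy_iff : ∀ o : Option (List (Int × Int)),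
      (∀ p, o = some p → ∃ t, p = (row, col) :: t) →
      (pvTruthyA o = true ↔ o.isSome) := by
    intro o h
    cases o with
    | none => simp [pvTruthyA]
    | some p =>
      obtain ⟨t, ht⟩ := h p rfl
      simp [pvTruthyA, ht]
  simp only [pvDfsA]
  rw [if_neg hbound, if_neg hcell']
  simp only [List.nil_append]
  set r1 := pvDfsA grid size rest (row + 0) (col + 1) (some (0, 1)) [(row, col)] with hr1
  set r2 := pvDfsA grid size rest (row + 1) (col + 0) (some (1, 0)) [(row, col)] with hr2
  set r3 := pvDfsA grid size rest (row + 1) (col + 1) (some (1, 1)) [(row, col)] with hr3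
  have e1 := dirEq 0 1 (by omega) (by omega)
  have e2 := dirEq 1 0 (by omega) (by omega)
  have e3 := dirEq 1 1 (by omega) (by omega)
  have pref : ∀ (dr dc : Int) (p : List (Int × Int)),
      pvDfsA grid size rest (row + dr) (col + dc) (some (dr, dc)) [(row, col)] = some p →
      ∃ t, p = (row, col) :: t := by
    intro dr dc p hp
    obtain ⟨t, ht⟩ := pvDfs_some_prefix grid size rest (row + dr) (col + dc) dr dc [(row, col)] p hp
    exact ⟨t, by simpa using ht⟩
  simp only [pvTryDirsB, ← e1, ← e2, ← e3, ← hr1, ← hr2, ← hr3]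
  have t1 := truthy_iff r1 (pref 0 1)
  have t2 := truthy_iff r2 (pref 1 0)
  have t3 := truthy_iff r3 (pref 1 1)
  cases h1 : r1 with
  | some p => simp [pvTruthyA, (by simpa [h1, pvTruthyA] using t1 : (!p.isEmpty) = true ↔ True)]
  | none =>
    simp only [pvTruthyA]
    cases h2 : r2 with
    | some p => simp [(by simpa [h2, pvTruthyA] using t2 : (!p.isEmpty) = true ↔ True)]
    | none =>
      simp only [pvTruthyA]
      cases h3 : r3 with
      | some p => simp [(by simpa [h3, pvTruthyA] using t3 : (!p.isEmpty) = true ↔ True)]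
      | none => rfl

-- a walk that succeeds returns an extension of its accumulated path
lemma pvWalk_some_prefix (grid : List (List String)) (size dr dc : Int) :
    ∀ (rest : List Char) (r c : Int) (path p : List (Int × Int)),
      pvWalkB grid size dr dc rest r c path = some p → ∃ t, p = path ++ t := by
  intro rest
  induction rest with
  | nil =>
    intro r c path p h
    simp only [pvWalkB, Option.some.injEq] at h
    exact ⟨[], by simp [h.symm]⟩
  | cons ch rest ih =>
    intro r c path p h
    simp only [pvWalkB] at h
    split at h
    · exact absurd h (by simp)
    · split at h
      · exact absurd h (by simp)
      · obtain ⟨t, ht⟩ := ih (r + dr) (c + dc) (path ++ [(r, c)]) p h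
        exact ⟨(r, c) :: t, by simp [ht]⟩

-- the per-cell results agree, hence the column scans agree
lemma pvScanCols_eq (grid : List (List String)) (w0 : Char) (rest : List Char)
    (row : Int) (hr : 0 ≤ row ∧ row < (grid.length : Int)) :
    ∀ cols : List Int, (∀ col ∈ cols, 0 ≤ col ∧ col < (grid.length : Int)) →
      pvScanColsA grid (grid.length : Int) (w0 :: rest) (String.ofList [w0]) row cols =
        pvScanColsB grid (grid.length : Int) (w0 :: rest) row cols := by
  intro cols
  induction cols with
  | nil => intro _; rfl
  | cons col cols ih =>
    intro hmem
    have hc := hmem col (by simp)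
    have hrec := ih (fun x hx => hmem x (by simp [hx]))
    simp only [pvScanColsA, pvScanColsB, List.getD_cons_zero]
    by_cases hcell : pvCellA grid row col == String.ofList [w0]
    · rw [if_pos hcell, if_pos hcell]
      have hcl : pvCellA grid row col = String.ofList [w0] := by
        exact eq_of_beq hcell
      rw [pvDfs_none_eq_tryDirs grid (grid.length : Int) w0 rest row col hr hc hcl]
      cases htd : pvTryDirsB grid (grid.length : Int) (w0 :: rest) row col [(0, 1), (1, 0), (1, 1)] with
      | none => simpa [pvTruthyA] using hrec
      | some p =>
        -- a produced path extends [(row,col)], hence is nonempty / truthy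
        have hnonempty : p ≠ [] := by
          have : ∀ ds, pvTryDirsB grid (grid.length : Int) (w0 :: rest) row col ds = some p →
              p ≠ [] := by
            intro ds
            induction ds with
            | nil => intro h; cases h
            | cons d ds ihd =>
              intro h
              obtain ⟨dr, dc⟩ := d
              simp only [pvTryDirsB] at h
              cases hw : pvWalkB grid (grid.length : Int) dr dc (w0 :: rest) row col [] with
              | none => rw [hw] at h; exact ihd h
              | some q =>
                rw [hw] at h
                simp only [Option.some.injEq] at h
                subst h
                -- the walk matched w0 at (row,col) first, so the path is nonempty
                simp only [pvWalkB] at hw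
                split at hw
                · cases hw
                · split at hw
                  · cases hw
                  · obtain ⟨t, ht⟩ := pvWalk_some_prefix grid (grid.length : Int) dr dc rest
                      (row + dr) (col + dc) [(row, col)] q hw
                    simp [ht]
          exact this _ htd
        simp [pvTruthyA, hnonempty]
    · rw [if_neg hcell, if_neg hcell]
      exact hrec

-- the row scans agree
lemma pvScanRows_eq (grid : List (List String)) (w0 : Char) (rest : List Char) :
    ∀ rows : List Int, (∀ row ∈ rows, 0 ≤ row ∧ row < (grid.length : Int)) →
      pvScanRowsA grid (grid.length : Int) (w0 :: rest) (String.ofList [w0]) rows =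
        pvScanRowsB grid (grid.length : Int) (w0 :: rest) rows := by
  intro rows
  induction rows with
  | nil => intro _; rfl
  | cons row rows ih =>
    intro hmem
    simp only [pvScanRowsA, pvScanRowsB]
    rw [pvScanCols_eq grid w0 rest row (hmem row (by simp))
      (PySem.List.pyRange 0 (grid.length : Int) 1)
      (fun x hx => by simpa using (PySem.List.mem_pyRange_one.mp hx))]
    cases pvScanColsB grid (grid.length : Int) (w0 :: rest) row (PySem.List.pyRange 0 (grid.length : Int) 1) with
    | some p => rfl
    | none => exact ih (fun x hx => hmem x (by simp [hx]))

-- ===== VERDICT (by name: the statement is the Claim_ definition above) =====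
theorem directional_dfs_ai_spec : Claim_equal_directional_dfs_ai := by
  intro grid word _ hpre
  unfold Spec_directional_dfs_ai directional_dfs_ai directional_dfs_ai_alt
  cases hg : grid with
  | nil => simp [pvScanRowsA, pvScanRowsB]
  | cons g0 gs =>
    have hw : word ≠ "" := by
      rcases hpre.1 with h | h
      · rw [hg] at h; cases h
      · exact h
    obtain ⟨w0, rest, hwl⟩ : ∃ w0 rest, word.toList = w0 :: rest := by
      cases hwl : word.toList with
      | nil =>
        rw [String.toList_eq_nil_iff] at hwl
        exact absurd hwl hw
      | cons a l => exact ⟨a, l, rfl⟩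
    rw [← hg, hwl]
    simp only [List.getD_cons_zero]
    exact pvScanRows_eq grid w0 rest (PySem.List.pyRange 0 (grid.length : Int) 1)
      (fun x hx => by simpa using (PySem.List.mem_pyRange_one.mp hx))
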